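-- pv_equiv track=rewrite | github.com/zhymma/KTCE | utils/parser.py | extract_api_calls
-- ===== SOURCE A (Python) =====
-- def extract_api_calls(code: str):
--     """
--     Extract non-indented code lines that appear after all function definitions in the provided code string.
--     """
--     lines = code.split("\n")  # Split the code into lines
--     api_calls = []
--     in_function = False  # To check if the current line is inside a function
--     past_functions = False  # To mark when all functions definitions have been parsed
--
--
--     last_def = 0
--     for i, line in enumerate(lines):
--         if line.startswith("def "):
--             last_def = i
--
--     for i, line in enumerate(lines):
--         if i < last_def:
--             continue
--         if line.startswith("def "):
--             in_function = True  # Start of a new function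
--         elif line.strip() == "" or (line.startswith(" ") and in_function):
--             continue  # Skip empty lines and lines inside functions
--         else:
--             in_function = False  # Any non-indented line after 'def' ends the function
--
--         if not in_function and not line.startswith("def "):
--             past_functions = True  # If we encounter a non-function, non-indented line, all functions are assumed past
--
--         if past_functions and not line.startswith(" ") and line.strip():
--             api_calls.append(line)  # Collect non-indented lines after all functions
--
--     api_calls = "\n".join(
--         api_calls
--     )  # Combine the non-indented lines into a single string
--     return api_calls
-- ===== SOURCE B (Python) =====
-- def extract_api_calls(code: str):
--     """
--     Extract non-indented code lines that appear after all function definitions in the provided code string.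
--     """
--     buf = []
--     for line in reversed(code.split("\n")):
--         if line.startswith("def "):
--             break
--         if line.strip() and not line.startswith(" "):
--             buf.append(line)
--     buf.reverse()
--     return "\n".join(buf)
-- ===== Notes on version B (the rewrite author's own statement) =====
-- stated objective: simpler
-- what changed: One backward scan that stops at the last def line, replacing A's two forward passes (find last def index, then a stateful in_function/past_functions filter).
import Mathlib
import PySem

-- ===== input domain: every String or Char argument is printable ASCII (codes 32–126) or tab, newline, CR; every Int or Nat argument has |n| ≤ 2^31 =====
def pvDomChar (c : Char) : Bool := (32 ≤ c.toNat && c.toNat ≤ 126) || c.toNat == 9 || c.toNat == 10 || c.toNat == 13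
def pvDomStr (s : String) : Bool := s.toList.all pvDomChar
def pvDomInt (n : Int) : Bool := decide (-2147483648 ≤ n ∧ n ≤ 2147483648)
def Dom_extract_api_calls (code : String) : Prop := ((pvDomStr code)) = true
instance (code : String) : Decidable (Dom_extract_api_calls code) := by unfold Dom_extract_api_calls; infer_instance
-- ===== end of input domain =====

-- B replaces A's two forward passes by one backward scan stopping at the last def line (simpler; same return value).

-- ===== PORT A =====
-- the two trailing if-statements of A's loop body (they run after the if/elif/else chain, except on continue)
def pvTail_extract (line : String) (inF past : Bool) (acc : List String) : Bool × Bool × List String :=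
  let past := if !inF && !(PySem.Str.startswith line "def ") then true else past
  let acc := if past && !(PySem.Str.startswith line " ") && !(PySem.Str.strip line == "") then acc ++ [line] else acc
  (inF, past, acc)

def pvStep_extract (last_def : Int) (st : Bool × Bool × List String) (p : Int × String) : Bool × Bool × List String :=
  if p.1 < last_def then st
  else if PySem.Str.startswith p.2 "def " then
    pvTail_extract p.2 true st.2.1 st.2.2
  else if PySem.Str.strip p.2 == "" || (PySem.Str.startswith p.2 " " && st.1) then st
  else
    pvTail_extract p.2 false st.2.1 st.2.2

def extract_api_calls (code : String) : String :=
  let lines := (PySem.Str.split? code "\n").getD []   -- sep "\n" ≠ "", so split? is always some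
  let last_def : Int :=
    (PySem.List.enumerate lines 0).foldl
      (fun acc p => if PySem.Str.startswith p.2 "def " then p.1 else acc) 0
  let st :=
    (PySem.List.enumerate lines 0).foldl (pvStep_extract last_def) (false, false, [])
  PySem.Str.join "\n" st.2.2

-- ===== PORT B =====
def pvIsDef (l : String) : Bool := PySem.Str.startswith l "def "
def pvKeep (l : String) : Bool := !(PySem.Str.strip l == "") && !(PySem.Str.startswith l " ")

-- backward scan: collect flat non-empty lines, stop at the first def line seen from the end
def pvScanBack : List String → List String
  | [] => []
  | l :: ls =>
    if pvIsDef l then []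
    else if pvKeep l then l :: pvScanBack ls
    else pvScanBack ls

def extract_api_calls_alt (code : String) : String :=
  PySem.Str.join "\n" ((pvScanBack ((PySem.Str.split? code "\n").getD []).reverse).reverse)

-- ===== PRECONDITION & SPEC =====
def Spec_extract_api_calls (code : String) (out : String) : Prop := out = extract_api_calls_alt code
instance (code : String) (out : String) : Decidable (Spec_extract_api_calls code out) := by unfold Spec_extract_api_calls; infer_instance

-- ===== CLAIM (what is proved, stated in full; the proofs are below) =====
def Claim_equal_extract_api_calls : Prop := ∀ (code : String), Dom_extract_api_calls code → Spec_extract_api_calls code (extract_api_calls code)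

-- ===== LEMMAS AND PROOFS =====

-- B side: the scan over a def-free stretch collects exactly the kept lines
theorem pvScanBack_noDef (xs rest : List String) (h : ∀ l ∈ xs, pvIsDef l = false) :
    pvScanBack (xs ++ rest) = xs.filter pvKeep ++ pvScanBack rest := by
  induction xs with
  | nil => simp
  | cons x xs ih =>
    have hx : pvIsDef x = false := h x (by simp)
    have hxs : ∀ l ∈ xs, pvIsDef l = false := fun l hl => h l (by simp [hl])
    simp only [List.cons_append, pvScanBack, hx, Bool.false_eq_true, if_false,
      List.filter_cons, ih hxs]
    by_cases hk : pvKeep x = true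
    · rw [if_pos hk, if_pos hk]; rfl
    · rw [if_neg (by simp [hk]), if_neg (by simp [hk])]

theorem pvScanBack_def (dl : String) (rest : List String) (h : pvIsDef dl = true) :
    pvScanBack (dl :: rest) = [] := by
  simp [pvScanBack, h]

-- last_def fold: a def-free suffix leaves the accumulator unchanged
theorem pvLastDef_noDef (xs : List String) (s a : Int) (h : ∀ l ∈ xs, pvIsDef l = false) :
    (PySem.List.enumerate xs s).foldl
      (fun acc p => if PySem.Str.startswith p.2 "def " then p.1 else acc) a = a := by
  induction xs generalizing s with
  | nil => simp [PySem.List.enumerate_nil]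
  | cons x xs ih =>
    have hx : PySem.Str.startswith x "def " = false := h x (by simp)
    rw [PySem.List.enumerate_cons, List.foldl_cons]
    simp only [hx, Bool.false_eq_true, if_false]
    exact ih (s + 1) (fun l hl => h l (by simp [hl]))

-- A side: all indices below last_def are skipped
theorem pvLoop_skip (L : Int) (xs : List String) (s : Int) (st : Bool × Bool × List String)
    (h : s + xs.length ≤ L) :
    (PySem.List.enumerate xs s).foldl (pvStep_extract L) st = st := by
  induction xs generalizing s st with
  | nil => simp [PySem.List.enumerate_nil]
  | cons x xs ih =>
    rw [PySem.List.enumerate_cons, List.foldl_cons]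
    have hs : s < L := by simp at h; omega
    have hstep : pvStep_extract L st (s, x) = st := by
      unfold pvStep_extract; exact if_pos hs
    rw [hstep]
    exact ih (s + 1) st (by simp at h ⊢; omega)

-- A's loop body on a non-def line with index ≥ L
theorem pvStep_nodef_skip (L s : Int) (x : String) (st : Bool × Bool × List String)
    (hlt : ¬ s < L) (hx : PySem.Str.startswith x "def " = false)
    (hskip : (PySem.Str.strip x == "" || (PySem.Str.startswith x " " && st.1)) = true) :
    pvStep_extract L st (s, x) = st := by
  unfold pvStep_extract
  rw [if_neg hlt, if_neg (by rw [hx]; simp)]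
  exact if_pos hskip

theorem pvStep_nodef_go (L s : Int) (x : String) (st : Bool × Bool × List String)
    (hlt : ¬ s < L) (hx : PySem.Str.startswith x "def " = false)
    (hskip : (PySem.Str.strip x == "" || (PySem.Str.startswith x " " && st.1)) = false) :
    pvStep_extract L st (s, x)
      = (false, true, st.2.2 ++ if pvKeep x then [x] else []) := by
  unfold pvStep_extract
  rw [if_neg hlt, if_neg (by rw [hx]; simp), if_neg (by rw [hskip]; simp)]
  unfold pvTail_extract
  rw [if_pos (by rw [hx]; simp)]
  cases hsp : PySem.Str.startswith x " " <;> cases hst : PySem.Str.strip x == "" <;>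
    simp only [pvKeep, hsp, hst, Bool.not_true, Bool.not_false, Bool.true_and, Bool.and_true,
      Bool.and_false, Bool.false_and, Bool.false_eq_true, if_false, if_true, List.append_nil] <;> rfl

-- A side: over a def-free stretch with indices ≥ L, the loop appends exactly the kept lines
theorem pvLoop_noDef (L : Int) (xs : List String) (s : Int) (st : Bool × Bool × List String)
    (hdef : ∀ l ∈ xs, pvIsDef l = false) (hs : L ≤ s) :
    ((PySem.List.enumerate xs s).foldl (pvStep_extract L) st).2.2 = st.2.2 ++ xs.filter pvKeep := by
  induction xs generalizing s st with
  | nil => simp [PySem.List.enumerate_nil]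
  | cons x xs ih =>
    have hx : PySem.Str.startswith x "def " = false := hdef x (by simp)
    have hxs : ∀ l ∈ xs, pvIsDef l = false := fun l hl => hdef l (by simp [hl])
    rw [PySem.List.enumerate_cons, List.foldl_cons]
    have hlt : ¬ ((s : Int) < L) := by omega
    rcases Bool.eq_false_or_eq_true
        (PySem.Str.strip x == "" || (PySem.Str.startswith x " " && st.1)) with hskip | hskip
    · rw [pvStep_nodef_skip L s x st hlt hx hskip, ih _ st hxs (by omega)]
      have hk : pvKeep x = false := by
        unfold pvKeep
        rcases Bool.or_eq_true_iff.mp hskip with h1 | h1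
        · rw [h1]; simp
        · rw [(Bool.and_eq_true_iff.mp h1).1]; simp
      simp [List.filter_cons, hk]
    · rw [pvStep_nodef_go L s x st hlt hx hskip, ih _ _ hxs (by omega)]
      by_cases hk : pvKeep x = true <;> simp [List.filter_cons, hk]

-- split a list containing a def line at its LAST def line
theorem pvSplitLast (xs : List String) (h : ∃ l ∈ xs, pvIsDef l = true) :
    ∃ pre dl post, xs = pre ++ dl :: post ∧ pvIsDef dl = true ∧ ∀ l ∈ post, pvIsDef l = false := by
  induction xs with
  | nil => simp at h
  | cons x xs ih =>
    by_cases hxs : ∃ l ∈ xs, pvIsDef l = true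
    · obtain ⟨pre, dl, post, heq, hd, hpost⟩ := ih hxs
      exact ⟨x :: pre, dl, post, by simp [heq], hd, hpost⟩
    · push_neg at hxs
      have hx : pvIsDef x = true := by
        rcases h with ⟨l, hl, hdl⟩
        rcases List.mem_cons.mp hl with rfl | hl
        · exact hdl
        · exact absurd hdl (hxs l hl)
      exact ⟨[], x, xs, rfl, hx, fun l hl => Bool.eq_false_iff.mpr (hxs l hl)⟩

-- the core list-level equality: A's loop result is B's reversed backward scan
theorem pvCore (lines : List String) :
    ((PySem.List.enumerate lines 0).foldl
        (pvStep_extract ((PySem.List.enumerate lines 0).foldl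
          (fun acc p => if PySem.Str.startswith p.2 "def " then p.1 else acc) 0))
        (false, false, [])).2.2
      = (pvScanBack lines.reverse).reverse := by
  by_cases h : ∃ l ∈ lines, pvIsDef l = true
  · obtain ⟨pre, dl, post, heq, hd, hpost⟩ := pvSplitLast lines h
    subst heq
    have hd' : PySem.Str.startswith dl "def " = true := hd
    have hlast :
        (PySem.List.enumerate (pre ++ dl :: post) 0).foldl
          (fun acc p => if PySem.Str.startswith p.2 "def " then p.1 else acc) 0
        = ((0 : Int) + pre.length) := by
      rw [PySem.List.enumerate_append, List.foldl_append,
          PySem.List.enumerate_cons, List.foldl_cons]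
      simp only [hd', if_pos rfl, if_true]
      exact pvLastDef_noDef post _ _ hpost
    rw [hlast]
    rw [PySem.List.enumerate_append, List.foldl_append,
        PySem.List.enumerate_cons, List.foldl_cons]
    rw [pvLoop_skip _ pre 0 _ (by simp)]
    have hstep : pvStep_extract ((0 : Int) + pre.length) (false, false, [])
        (((0 : Int) + pre.length), dl) = (true, false, []) := by
      unfold pvStep_extract
      rw [if_neg (by simp), if_pos hd']
      simp [pvTail_extract]
    rw [hstep, pvLoop_noDef _ post _ _ hpost (by omega)]
    have hrev : (pre ++ dl :: post).reverse = post.reverse ++ (dl :: pre.reverse) := by simp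
    rw [hrev,
        pvScanBack_noDef post.reverse (dl :: pre.reverse)
          (fun l hl => hpost l (List.mem_reverse.mp hl)),
        pvScanBack_def dl pre.reverse hd]
    simp [List.filter_reverse]
  · push_neg at h
    have hnd : ∀ l ∈ lines, pvIsDef l = false := fun l hl => Bool.eq_false_iff.mpr (h l hl)
    rw [pvLastDef_noDef lines 0 0 hnd, pvLoop_noDef 0 lines 0 _ hnd le_rfl]
    have hscan := pvScanBack_noDef lines.reverse []
      (fun l hl => hnd l (List.mem_reverse.mp hl))
    simp only [List.append_nil] at hscan
    rw [hscan]
    simp [pvScanBack, List.filter_reverse]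

-- ===== VERDICT (by name: the statement is the Claim_ definition above) =====
theorem extract_api_calls_spec : Claim_equal_extract_api_calls := by
  intro code _
  show extract_api_calls code = extract_api_calls_alt code
  simp only [extract_api_calls, extract_api_calls_alt]
  exact congrArg _ (pvCore _)
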